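-- pv_equiv track=rewrite | github.com/sustrik/uxy | base.py | split_fields_widths
-- ===== SOURCE A (Python) =====
-- UNQUOTED = 1
--
-- QUOTED = 2
--
-- ESCAPE = 3
--
-- TRAILING = 4
--
-- def split_fields_widths(s):
--   fields = []
--   widths = []
--   state = TRAILING
--   field = ""
--   width = 0
--   for c in s:
--     if state == UNQUOTED:
--       if c == ' ':
--         width += 1
--         state = TRAILING
--       else:
--         field += c
--         width += 1
--     elif state == QUOTED:
--       if c == "\\":
--         field += c
--         width += 1
--         state = ESCAPE
--       elif c == '"':
--         field += c
--         width += 1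
--         state = TRAILING
--       else:
--         field += c
--         width += 1
--     elif state == ESCAPE:
--       field += c
--       width += 1
--       state = QUOTED
--     elif state == TRAILING:
--       if c == " ":
--         width += 1
--       else:
--         if len(field) > 0:
--           fields.append(field)
--           widths.append(width)
--         field = c
--         width = 1
--         if c == '"':
--           state = QUOTED
--         else:
--           state = UNQUOTED
--   if len(field) > 0:
--     fields.append(field)
--     widths.append(width)
--   return (fields, widths)
-- ===== SOURCE B (Python) =====
-- def split_fields_widths(s):
--   n = len(s)
--   fields = []
--   widths = []
--   i = 0
--   while i < n and s[i] == ' ':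
--     i += 1
--   while i < n:
--     start = i
--     if s[i] == '"':
--       i += 1
--       while i < n:
--         if s[i] == '\\':
--           i += 2
--         elif s[i] == '"':
--           i += 1
--           break
--         else:
--           i += 1
--     else:
--       i += 1
--       while i < n and s[i] != ' ':
--         i += 1
--     field = s[start:i]
--     width = len(field)
--     while i < n and s[i] == ' ':
--       i += 1
--       width += 1
--     fields.append(field)
--     widths.append(width)
--   return (fields, widths)
-- ===== Notes on version B (the rewrite author's own statement) =====
-- stated objective: simpler
-- what changed: Replaced A's four-state per-character state machine (with explicit UNQUOTED/QUOTED/ESCAPE/TRAILING states and char-by-char field building) by an index-based token scanner that skips leading spaces, slices one whole quoted or unquoted token at a time, then counts trailing spaces into the width.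
import Mathlib
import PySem

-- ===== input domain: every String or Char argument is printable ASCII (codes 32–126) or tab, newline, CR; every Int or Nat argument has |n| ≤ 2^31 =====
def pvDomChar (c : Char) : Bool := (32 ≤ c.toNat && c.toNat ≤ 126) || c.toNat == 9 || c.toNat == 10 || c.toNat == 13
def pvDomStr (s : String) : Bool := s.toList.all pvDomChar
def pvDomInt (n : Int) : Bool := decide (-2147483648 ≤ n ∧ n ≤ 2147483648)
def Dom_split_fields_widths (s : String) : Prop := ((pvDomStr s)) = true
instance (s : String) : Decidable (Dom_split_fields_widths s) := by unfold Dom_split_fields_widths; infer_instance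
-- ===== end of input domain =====

-- B replaces A's four-state per-character state machine by an index-based token scanner
-- (skip leading spaces, take one quoted/unquoted token, count trailing spaces); objective: simpler.

-- ===== PORT A =====
-- Python state constants
def pvUNQUOTED : Int := 1
def pvQUOTED : Int := 2
def pvESCAPE : Int := 3
def pvTRAILING : Int := 4

-- loop state: (fields, widths, state, field, width); Python strings carried as List Char
def splitA_step (st : List (List Char) × List Int × Int × List Char × Int) (c : Char) :
    List (List Char) × List Int × Int × List Char × Int :=
  let (fields, widths, state, field, width) := st
  if state == pvUNQUOTED then
    if c == ' ' then (fields, widths, pvTRAILING, field, width + 1)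
    else (fields, widths, state, field ++ [c], width + 1)
  else if state == pvQUOTED then
    if c == '\\' then (fields, widths, pvESCAPE, field ++ [c], width + 1)
    else if c == '"' then (fields, widths, pvTRAILING, field ++ [c], width + 1)
    else (fields, widths, state, field ++ [c], width + 1)
  else if state == pvESCAPE then
    (fields, widths, pvQUOTED, field ++ [c], width + 1)
  else
    if c == ' ' then (fields, widths, state, field, width + 1)
    else
      let fw := if field.length > 0 then (fields ++ [field], widths ++ [width]) else (fields, widths)
      (fw.1, fw.2, if c == '"' then pvQUOTED else pvUNQUOTED, [c], 1)

def split_fields_widths (s : String) : List String × List Int :=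
  let r := s.toList.foldl splitA_step ([], [], pvTRAILING, [], 0)
  let fw := if r.2.2.2.1.length > 0 then (r.1 ++ [r.2.2.2.1], r.2.1 ++ [r.2.2.2.2]) else (r.1, r.2.1)
  (fw.1.map (fun f => String.mk f), fw.2)

-- ===== PORT B =====
-- consume a quoted token after its opening '"' (backslash escapes the next char);
-- returns (consumed chars, rest)
def scanQuoted : List Char → List Char × List Char
  | [] => ([], [])
  | c :: rest =>
    if c == '\\' then
      match rest with
      | [] => ([c], [])
      | d :: rest' => let p := scanQuoted rest'; (c :: d :: p.1, p.2)
    else if c == '"' then ([c], rest)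
    else let p := scanQuoted rest; (c :: p.1, p.2)

-- consume an unquoted token up to the next space
def scanUnquoted : List Char → List Char × List Char
  | [] => ([], [])
  | c :: rest =>
    if c == ' ' then ([], c :: rest)
    else let p := scanUnquoted rest; (c :: p.1, p.2)

-- count leading spaces, return (count, rest)
def countSpaces : List Char → Int × List Char
  | [] => (0, [])
  | c :: rest =>
    if c == ' ' then let p := countSpaces rest; (p.1 + 1, p.2)
    else (0, c :: rest)

theorem scanQuoted_len : ∀ (n : Nat) (l : List Char), l.length ≤ n →
    (scanQuoted l).2.length ≤ l.length := by
  intro n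
  induction n with
  | zero =>
    intro l hl
    have : l = [] := by cases l <;> simp_all
    subst this; simp [scanQuoted]
  | succ n ih =>
    intro l hl
    match l with
    | [] => simp [scanQuoted]
    | c :: rest =>
      by_cases hb : c == '\\'
      · match rest with
        | [] => simp [scanQuoted, hb]
        | d :: rest' =>
          have := ih rest' (by simp at hl; omega)
          simp only [scanQuoted, hb, if_pos]
          simp; omega
      · by_cases hq : c == '"'
        · rw [scanQuoted.eq_def]; simp [hb, hq]
        · have := ih rest (by simp at hl; omega)
          rw [scanQuoted.eq_def]; simp [hb, hq]; omega

theorem scanUnquoted_len : ∀ l : List Char, (scanUnquoted l).2.length ≤ l.length := by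
  intro l
  induction l with
  | nil => simp [scanUnquoted]
  | cons c rest ih =>
    by_cases h : c == ' ' <;> simp [scanUnquoted, h] <;> omega

theorem countSpaces_len : ∀ l : List Char, (countSpaces l).2.length ≤ l.length := by
  intro l
  induction l with
  | nil => simp [countSpaces]
  | cons c rest ih =>
    by_cases h : c == ' ' <;> simp [countSpaces, h] <;> omega

-- main token loop: head of the list is a non-space token start
def tokensLoop : List Char → List (List Char) × List Int
  | [] => ([], [])
  | c :: rest =>
    let p := if c == '"' then scanQuoted rest else scanUnquoted rest
    let tok := c :: p.1
    let q := countSpaces p.2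
    let r := tokensLoop q.2
    (tok :: r.1, ((tok.length : Int) + q.1) :: r.2)
termination_by l => l.length
decreasing_by
  simp only [List.length_cons]
  by_cases hc : (c == '"') = true
  · have h2 := scanQuoted_len rest.length rest le_rfl
    have h1 := countSpaces_len (scanQuoted rest).2
    simp [hc]
    omega
  · have h2 := scanUnquoted_len rest
    have h1 := countSpaces_len (scanUnquoted rest).2
    simp [hc]
    omega

def split_fields_widths_alt (s : String) : List String × List Int :=
  let r := tokensLoop (s.toList.dropWhile (fun c => c == ' '))
  (r.1.map (fun f => String.mk f), r.2)

-- ===== PRECONDITION & SPEC =====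
def Spec_split_fields_widths (s : String) (out : List String × List Int) : Prop := out = split_fields_widths_alt s
instance (s : String) (out : List String × List Int) : Decidable (Spec_split_fields_widths s out) := by unfold Spec_split_fields_widths; infer_instance

-- ===== CLAIM (what is proved, stated in full; the proofs are below) =====
def Claim_equal_split_fields_widths : Prop := ∀ (s : String), Dom_split_fields_widths s → Spec_split_fields_widths s (split_fields_widths s)

-- ===== LEMMAS AND PROOFS =====

-- A's machine restated as structural recursion (fold step + final flush)
def runA (st : List (List Char) × List Int × Int × List Char × Int) : List Char → List (List Char) × List Int
  | [] => if st.2.2.2.1.length > 0 then (st.1 ++ [st.2.2.2.1], st.2.1 ++ [st.2.2.2.2]) else (st.1, st.2.1)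
  | c :: l => runA (splitA_step st c) l

theorem runA_foldl : ∀ (l : List Char) st,
    runA st l =
      (let r := l.foldl splitA_step st
       if r.2.2.2.1.length > 0 then (r.1 ++ [r.2.2.2.1], r.2.1 ++ [r.2.2.2.2]) else (r.1, r.2.1)) := by
  intro l
  induction l with
  | nil => intro st; rfl
  | cons c l ih => intro st; simp only [runA, List.foldl_cons, ih]

theorem tokensLoop_nil : tokensLoop [] = ([], []) := by rw [tokensLoop]

theorem tokensLoop_cons (c : Char) (rest : List Char) : tokensLoop (c :: rest) =
    (let p := if c == '"' then scanQuoted rest else scanUnquoted rest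
     let tok := c :: p.1
     let q := countSpaces p.2
     let r := tokensLoop q.2
     (tok :: r.1, ((tok.length : Int) + q.1) :: r.2)) := by rw [tokensLoop]

theorem scanQuoted_cons (c : Char) (rest : List Char) :
    scanQuoted (c :: rest) =
      (if c == '\\' then
        match rest with
        | [] => ([c], [])
        | d :: rest' => let p := scanQuoted rest'; (c :: d :: p.1, p.2)
      else if c == '"' then ([c], rest)
      else let p := scanQuoted rest; (c :: p.1, p.2)) := by rw [scanQuoted.eq_def]

theorem runA_T0 (fs : List (List Char)) (ws : List Int) (w : Int) (c : Char) (l : List Char) :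
    runA (fs, ws, pvTRAILING, ([] : List Char), w) (c :: l) =
      if c == ' ' then runA (fs, ws, pvTRAILING, ([] : List Char), w + 1) l
      else if c == '"' then runA (fs, ws, pvQUOTED, [c], 1) l
      else runA (fs, ws, pvUNQUOTED, [c], 1) l := by
  by_cases hc : (c == ' ') = true <;> by_cases hq : (c == '"') = true <;>
    simp [runA, splitA_step, pvTRAILING, pvUNQUOTED, pvQUOTED, pvESCAPE, hc, hq]

theorem runA_T (fs : List (List Char)) (ws : List Int) (f : List Char) (w : Int) (c : Char)
    (l : List Char) (hf : f.length > 0) :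
    runA (fs, ws, pvTRAILING, f, w) (c :: l) =
      if c == ' ' then runA (fs, ws, pvTRAILING, f, w + 1) l
      else if c == '"' then runA (fs ++ [f], ws ++ [w], pvQUOTED, [c], 1) l
      else runA (fs ++ [f], ws ++ [w], pvUNQUOTED, [c], 1) l := by
  by_cases hc : (c == ' ') = true <;> by_cases hq : (c == '"') = true <;>
    simp [runA, splitA_step, pvTRAILING, pvUNQUOTED, pvQUOTED, pvESCAPE, hc, hq, hf]

theorem runA_U (fs : List (List Char)) (ws : List Int) (f : List Char) (w : Int) (c : Char)
    (l : List Char) :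
    runA (fs, ws, pvUNQUOTED, f, w) (c :: l) =
      if c == ' ' then runA (fs, ws, pvTRAILING, f, w + 1) l
      else runA (fs, ws, pvUNQUOTED, f ++ [c], w + 1) l := by
  by_cases hc : (c == ' ') = true <;>
    simp [runA, splitA_step, pvTRAILING, pvUNQUOTED, pvQUOTED, pvESCAPE, hc]

theorem runA_Q (fs : List (List Char)) (ws : List Int) (f : List Char) (w : Int) (c : Char)
    (l : List Char) :
    runA (fs, ws, pvQUOTED, f, w) (c :: l) =
      if c == '\\' then runA (fs, ws, pvESCAPE, f ++ [c], w + 1) l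
      else if c == '"' then runA (fs, ws, pvTRAILING, f ++ [c], w + 1) l
      else runA (fs, ws, pvQUOTED, f ++ [c], w + 1) l := by
  by_cases hb : (c == '\\') = true <;> by_cases hq : (c == '"') = true <;>
    simp [runA, splitA_step, pvTRAILING, pvUNQUOTED, pvQUOTED, pvESCAPE, hb, hq]

theorem runA_E (fs : List (List Char)) (ws : List Int) (f : List Char) (w : Int) (c : Char)
    (l : List Char) :
    runA (fs, ws, pvESCAPE, f, w) (c :: l) = runA (fs, ws, pvQUOTED, f ++ [c], w + 1) l := by
  simp [runA, splitA_step, pvTRAILING, pvUNQUOTED, pvQUOTED, pvESCAPE]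

theorem main_invariant : ∀ (n : Nat) (l : List Char), l.length ≤ n →
    (∀ fs ws w, runA (fs, ws, pvTRAILING, ([] : List Char), w) l =
        (fs ++ (tokensLoop (l.dropWhile (fun c => c == ' '))).1,
         ws ++ (tokensLoop (l.dropWhile (fun c => c == ' '))).2)) ∧
    (∀ fs ws (f : List Char) w, f ≠ [] → runA (fs, ws, pvTRAILING, f, w) l =
        (fs ++ f :: (tokensLoop (countSpaces l).2).1,
         ws ++ (w + (countSpaces l).1) :: (tokensLoop (countSpaces l).2).2)) ∧
    (∀ fs ws (f : List Char) w, f ≠ [] → runA (fs, ws, pvUNQUOTED, f, w) l =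
        (fs ++ (f ++ (scanUnquoted l).1) :: (tokensLoop (countSpaces (scanUnquoted l).2).2).1,
         ws ++ (w + ((scanUnquoted l).1.length : Int) + (countSpaces (scanUnquoted l).2).1) ::
           (tokensLoop (countSpaces (scanUnquoted l).2).2).2)) ∧
    (∀ fs ws (f : List Char) w, f ≠ [] → runA (fs, ws, pvQUOTED, f, w) l =
        (fs ++ (f ++ (scanQuoted l).1) :: (tokensLoop (countSpaces (scanQuoted l).2).2).1,
         ws ++ (w + ((scanQuoted l).1.length : Int) + (countSpaces (scanQuoted l).2).1) ::
           (tokensLoop (countSpaces (scanQuoted l).2).2).2)) := by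
  intro n
  induction n with
  | zero =>
    intro l hl
    have hnil : l = [] := by cases l <;> simp_all
    subst hnil
    refine ⟨?_, ?_, ?_, ?_⟩
    · intro fs ws w
      simp [runA, tokensLoop_nil]
    all_goals
      intro fs ws f w hf
      have hpos : f.length > 0 := List.length_pos_iff.mpr hf
      simp [runA, tokensLoop_nil, countSpaces, scanUnquoted, scanQuoted, hpos]
  | succ n ih =>
    intro l hl
    match l with
    | [] =>
      refine ⟨?_, ?_, ?_, ?_⟩
      · intro fs ws w
        simp [runA, tokensLoop_nil]
      all_goals
        intro fs ws f w hf
        have hpos : f.length > 0 := List.length_pos_iff.mpr hf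
        simp [runA, tokensLoop_nil, countSpaces, scanUnquoted, scanQuoted, hpos]
    | c :: rest =>
      have hr : rest.length ≤ n := by simp at hl; omega
      obtain ⟨ihT0, ihT, ihU, ihQ⟩ := ih rest hr
      refine ⟨?_, ?_, ?_, ?_⟩
      -- TRAILING with empty field (leading spaces / start of a token)
      · intro fs ws w
        rw [runA_T0]
        by_cases hc : (c == ' ') = true
        · rw [if_pos hc, ihT0 fs ws (w + 1)]
          simp [List.dropWhile_cons, hc]
        · rw [if_neg hc]
          by_cases hq : (c == '"') = true
          · rw [if_pos hq, ihQ fs ws [c] 1 (by simp)]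
            simp [List.dropWhile_cons, hc, tokensLoop_cons, hq]
            omega
          · rw [if_neg hq, ihU fs ws [c] 1 (by simp)]
            simp [List.dropWhile_cons, hc, tokensLoop_cons, hq]
            omega
      -- TRAILING with pending non-empty field
      · intro fs ws f w hf
        have hpos : f.length > 0 := List.length_pos_iff.mpr hf
        rw [runA_T fs ws f w c rest hpos]
        by_cases hc : (c == ' ') = true
        · rw [if_pos hc, ihT fs ws f (w + 1) hf]
          simp [countSpaces, hc]
          omega
        · rw [if_neg hc]
          by_cases hq : (c == '"') = true
          · rw [if_pos hq, ihQ (fs ++ [f]) (ws ++ [w]) [c] 1 (by simp)]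
            simp [countSpaces, hc, tokensLoop_cons, hq]
            omega
          · rw [if_neg hq, ihU (fs ++ [f]) (ws ++ [w]) [c] 1 (by simp)]
            simp [countSpaces, hc, tokensLoop_cons, hq]
            omega
      -- UNQUOTED
      · intro fs ws f w hf
        rw [runA_U]
        by_cases hc : (c == ' ') = true
        · rw [if_pos hc, ihT fs ws f (w + 1) hf]
          simp [scanUnquoted, countSpaces, hc]
          omega
        · rw [if_neg hc, ihU fs ws (f ++ [c]) (w + 1) (by simp)]
          simp [scanUnquoted, hc]
          omega
      -- QUOTED
      · intro fs ws f w hf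
        rw [runA_Q]
        by_cases hb : (c == '\\') = true
        · rw [if_pos hb]
          match rest with
          | [] =>
            have hpos : (f ++ [c]).length > 0 := by simp
            simp [runA, scanQuoted_cons, hb, countSpaces, tokensLoop_nil, hpos]
          | d :: rest' =>
            have hQ' := (ih rest' (by simp at hl; omega)).2.2.2
            rw [runA_E, hQ' fs ws (f ++ [c] ++ [d]) (w + 1 + 1) (by simp)]
            rw [scanQuoted_cons]
            simp [hb]
            omega
        · rw [if_neg hb]
          by_cases hq : (c == '"') = true
          · rw [if_pos hq, ihT fs ws (f ++ [c]) (w + 1) (by simp)]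
            rw [scanQuoted_cons]
            simp [hb, hq]
          · rw [if_neg hq, ihQ fs ws (f ++ [c]) (w + 1) (by simp)]
            rw [scanQuoted_cons]
            simp [hb, hq]
            omega

-- ===== VERDICT (by name: the statement is the Claim_ definition above) =====
theorem split_fields_widths_spec : Claim_equal_split_fields_widths := by
  intro s _
  show split_fields_widths s = split_fields_widths_alt s
  have h := (main_invariant s.toList.length s.toList le_rfl).1 [] [] 0
  rw [runA_foldl] at h
  simp only [List.nil_append] at h
  unfold split_fields_widths split_fields_widths_alt
  dsimp only
  rw [h]
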